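-- pv_equiv track=rewrite | github.com/MATTHEWLI07/CompetitiveProgrammingPrep | CCC'16S1.py | is_wildcard_anagram
-- ===== SOURCE A (Python) =====
-- def is_wildcard_anagram(s1, s2):
--     from collections import Counter
--
--     count_s1 = Counter(s1)
--
--     for char in s2:
--         if char != '*':
--             if char in count_s1 and count_s1[char] > 0:
--                 count_s1[char] -= 1
--             else:
--                 return 'N'
--
--     return 'A'
-- ===== SOURCE B (Python) =====
-- def is_wildcard_anagram(s1, s2):
--     from collections import Counter
--
--     count_s1 = Counter(s1)
--     count_s2 = Counter(s2)
--
--     for char, n in count_s2.items():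
--         if char != '*' and n > count_s1[char]:
--             return 'N'
--
--     return 'A'
-- ===== Notes on version B (the rewrite author's own statement) =====
-- stated objective: faster
-- what changed: Replaces A's character-by-character consuming walk (decrementing a mutable counter of s1 with an interpreted per-character loop) by an aggregate-then-compare: build both Counters once in C and compare counts only over the distinct non-'*' characters of s2.
import Mathlib
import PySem

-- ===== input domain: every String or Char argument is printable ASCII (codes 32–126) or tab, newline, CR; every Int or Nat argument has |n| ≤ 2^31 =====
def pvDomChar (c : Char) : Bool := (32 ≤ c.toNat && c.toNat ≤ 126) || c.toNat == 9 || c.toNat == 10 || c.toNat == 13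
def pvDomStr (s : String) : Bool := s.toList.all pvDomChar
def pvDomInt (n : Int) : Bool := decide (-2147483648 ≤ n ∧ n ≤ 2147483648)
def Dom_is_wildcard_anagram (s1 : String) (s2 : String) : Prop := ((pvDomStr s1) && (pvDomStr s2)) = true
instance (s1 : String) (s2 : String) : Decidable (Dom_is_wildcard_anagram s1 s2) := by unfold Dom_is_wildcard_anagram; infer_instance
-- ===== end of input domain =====

-- B replaces A's consuming walk over s2 (decrementing Counter(s1) with early exit per character)
-- by building both Counters and comparing per-distinct-character counts (objective: alternative).

-- ===== PORT A =====
-- the 'for char in s2' loop with its early 'return N'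
def pvLoopA : List Char → PySem.Dict Char Int → String
  | [], _ => "A"
  | c :: rest, d =>
    if c != '*' then
      if d.contains c && decide (0 < d.getD c 0) then
        pvLoopA rest (d.modify c 0 (· - 1))
      else "N"
    else pvLoopA rest d

def is_wildcard_anagram (s1 : String) (s2 : String) : String :=
  pvLoopA s2.toList (PySem.Dict.counter s1.toList)

-- ===== PORT B =====
def is_wildcard_anagram_alt (s1 : String) (s2 : String) : String :=
  let count_s1 := PySem.Dict.counter s1.toList
  let count_s2 := PySem.Dict.counter s2.toList
  if count_s2.items.any (fun p => p.1 != '*' && decide (count_s1.getD p.1 0 < p.2)) then "N"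
  else "A"

-- ===== PRECONDITION & SPEC =====
def Spec_is_wildcard_anagram (s1 : String) (s2 : String) (out : String) : Prop := out = is_wildcard_anagram_alt s1 s2
instance (s1 : String) (s2 : String) (out : String) : Decidable (Spec_is_wildcard_anagram s1 s2 out) := by unfold Spec_is_wildcard_anagram; infer_instance

-- ===== CLAIM (what is proved, stated in full; the proofs are below) =====
def Claim_equal_is_wildcard_anagram : Prop := ∀ (s1 : String) (s2 : String), Dom_is_wildcard_anagram s1 s2 → Spec_is_wildcard_anagram s1 s2 (is_wildcard_anagram s1 s2)

-- ===== LEMMAS AND PROOFS =====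

-- 'char in count_s1 and count_s1[char] > 0' collapses to the count being positive
lemma pv_contains_and_pos (d : PySem.Dict Char Int) (c : Char) :
    (d.contains c && decide (0 < d.getD c 0)) = decide (0 < d.getD c 0) := by
  cases h : d.contains c
  · simp [PySem.Dict.getD_of_not_contains d (0:Int) h]
  · simp

lemma pvLoopA_A_or_N (rest : List Char) (d : PySem.Dict Char Int) :
    pvLoopA rest d = "A" ∨ pvLoopA rest d = "N" := by
  induction rest generalizing d with
  | nil => left; rfl
  | cons c rest ih =>
    simp only [pvLoopA]
    split
    · split
      · exact ih _
      · right; rfl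
    · exact ih _

-- A's loop succeeds iff the remaining non-'*' demand fits into the current counter
lemma pvLoopA_eq_A_iff (rest : List Char) (d : PySem.Dict Char Int) :
    pvLoopA rest d = "A" ↔
      ∀ c ∈ rest.filter (fun x => x != '*'),
        ((rest.filter (fun x => x != '*')).count c : Int) ≤ d.getD c 0 := by
  induction rest generalizing d with
  | nil => simp [pvLoopA]
  | cons c rest ih =>
    by_cases hc : c = '*'
    · subst hc
      simp only [pvLoopA, bne_self_eq_false, Bool.false_eq_true, if_false, List.filter_cons]
      simpa using ih d
    · have hcb : (c != '*') = true := bne_iff_ne.mpr hc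
      simp only [pvLoopA, hcb, if_true, pv_contains_and_pos, List.filter_cons]
      by_cases hpos : 0 < d.getD c 0
      · simp only [hpos, decide_true, if_true]
        rw [ih]
        constructor
        · intro h c' hc'
          by_cases he : c' = c
          · subst he
            rw [List.count_cons_self]
            by_cases hmem : c' ∈ rest.filter (fun x => x != '*')
            · have := h c' hmem
              rw [PySem.Dict.getD_modify, if_pos rfl] at this
              push_cast at this ⊢
              omega
            · rw [List.count_eq_zero.2 hmem]
              push_cast
              omega
          · have h1 : c' ∈ rest.filter (fun x => x != '*') := by
              rcases List.mem_cons.1 hc' with h2 | h2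
              · exact absurd h2 he
              · exact h2
            have := h c' h1
            rw [PySem.Dict.getD_modify, if_neg he] at this
            rw [List.count_cons_of_ne (fun h2 => he h2.symm)]
            exact this
        · intro h c' hc'
          rw [PySem.Dict.getD_modify]
          by_cases he : c' = c
          · subst he
            rw [if_pos rfl]
            have := h c' (List.mem_cons_self)
            rw [List.count_cons_self] at this
            push_cast at this ⊢
            omega
          · rw [if_neg he]
            have := h c' (List.mem_cons_of_mem _ hc')
            rw [List.count_cons_of_ne (fun h2 => he h2.symm)] at this
            exact this
      · simp only [hpos, decide_false, Bool.false_eq_true, if_false]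
        constructor
        · intro h; exact absurd h (by decide)
        · intro h
          exfalso
          have := h c (List.mem_cons_self)
          rw [List.count_cons_self] at this
          have hnn : (0:Int) ≤ ((rest.filter (fun x => x != '*')).count c : Int) := by positivity
          push_cast at this
          omega

-- B succeeds iff no non-'*' character of s2 outcounts s1
lemma pv_alt_eq_A_iff (s1 s2 : String) :
    is_wildcard_anagram_alt s1 s2 = "A" ↔
      ∀ c ∈ s2.toList, c ≠ '*' → ((s2.toList.count c : Int) ≤ (s1.toList.count c : Int)) := by
  unfold is_wildcard_anagram_alt
  dsimp only
  split
  · rename_i hany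
    constructor
    · intro h; exact absurd h (by decide)
    · intro h
      exfalso
      rw [List.any_eq_true] at hany
      obtain ⟨p, hp, hcond⟩ := hany
      rw [PySem.Dict.items_counter, List.mem_map] at hp
      obtain ⟨k, hk, rfl⟩ := hp
      have hkmem : k ∈ s2.toList := (PySem.Set.mem_ofList _ _).1 hk
      simp only [Bool.and_eq_true, bne_iff_ne, decide_eq_true_eq, ne_eq] at hcond
      have := h k hkmem hcond.1
      rw [PySem.Dict.getD_counter] at hcond
      omega
  · rename_i hany
    constructor
    · intro _ c hc hne
      rw [Bool.not_eq_true, List.any_eq_false] at hany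
      have := hany (c, (s2.toList.count c : Int))
        (by
          rw [PySem.Dict.items_counter, List.mem_map]
          exact ⟨c, (PySem.Set.mem_ofList _ _).2 hc, rfl⟩)
      simp only [Bool.and_eq_false_iff, decide_eq_false_iff_not, not_lt, Bool.not_eq_true] at this
      rcases this with h1 | h1
      · simp only [bne_eq_false_iff_eq] at h1; exact absurd h1 hne
      · rw [PySem.Dict.getD_counter] at h1; exact h1
    · intro _; rfl

-- A's condition, restated over s2's characters
lemma pv_A_eq_A_iff (s1 s2 : String) :
    is_wildcard_anagram s1 s2 = "A" ↔
      ∀ c ∈ s2.toList, c ≠ '*' → ((s2.toList.count c : Int) ≤ (s1.toList.count c : Int)) := by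
  unfold is_wildcard_anagram
  rw [pvLoopA_eq_A_iff]
  constructor
  · intro h c hc hne
    have hmem : c ∈ s2.toList.filter (fun x => x != '*') := by
      rw [List.mem_filter]; exact ⟨hc, bne_iff_ne.mpr hne⟩
    have := h c hmem
    rw [PySem.Dict.getD_counter, List.count_filter (p := fun x => x != '*') (bne_iff_ne.mpr hne)] at this
    exact this
  · intro h c hc
    rw [List.mem_filter] at hc
    have hne : c ≠ '*' := bne_iff_ne.mp hc.2
    have := h c hc.1 hne
    rw [PySem.Dict.getD_counter, List.count_filter (p := fun x => x != '*') hc.2]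
    exact this

-- ===== VERDICT (by name: the statement is the Claim_ definition above) =====
theorem is_wildcard_anagram_spec : Claim_equal_is_wildcard_anagram := by
  intro s1 s2 _
  unfold Spec_is_wildcard_anagram
  have halt : is_wildcard_anagram_alt s1 s2 = "A" ∨ is_wildcard_anagram_alt s1 s2 = "N" := by
    unfold is_wildcard_anagram_alt; dsimp only; split
    · right; rfl
    · left; rfl
  have hiff := (pv_A_eq_A_iff s1 s2).trans (pv_alt_eq_A_iff s1 s2).symm
  have hAorN : is_wildcard_anagram s1 s2 = "A" ∨ is_wildcard_anagram s1 s2 = "N" := by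
    unfold is_wildcard_anagram; exact pvLoopA_A_or_N _ _
  rcases hAorN with hA | hA
  · rw [hA]; exact (hiff.1 hA).symm
  · rcases halt with hB | hB
    · exact absurd (hiff.2 hB) (by simp [hA])
    · rw [hA, hB]
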